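-- pv_equiv track=rewrite | github.com/nikolagd/repo-search | etl/parser.py | pick_source_url
-- ===== SOURCE A (Python) =====
-- def pick_source_url(identifiers):
--     for value in identifiers:
--         if value.startswith("https://rfos.fon.bg.ac.rs/handle/"):
--             return value
--     for value in identifiers:
--         if value.startswith("http://") or value.startswith("https://"):
--             return value
--     return None
-- ===== SOURCE B (Python) =====
-- def pick_source_url(identifiers):
--     fallback = None
--     for value in identifiers:
--         if value.startswith("https://rfos.fon.bg.ac.rs/handle/"):
--             return value
--         if fallback is None and (value.startswith("http://") or value.startswith("https://")):
--             fallback = value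
--     return fallback
-- ===== Notes on version B (the rewrite author's own statement) =====
-- stated objective: simpler
-- what changed: Replaces A's two sequential scans with a single pass that returns a handle-prefixed value immediately and remembers the first http(s) value as a fallback.
import Mathlib
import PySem

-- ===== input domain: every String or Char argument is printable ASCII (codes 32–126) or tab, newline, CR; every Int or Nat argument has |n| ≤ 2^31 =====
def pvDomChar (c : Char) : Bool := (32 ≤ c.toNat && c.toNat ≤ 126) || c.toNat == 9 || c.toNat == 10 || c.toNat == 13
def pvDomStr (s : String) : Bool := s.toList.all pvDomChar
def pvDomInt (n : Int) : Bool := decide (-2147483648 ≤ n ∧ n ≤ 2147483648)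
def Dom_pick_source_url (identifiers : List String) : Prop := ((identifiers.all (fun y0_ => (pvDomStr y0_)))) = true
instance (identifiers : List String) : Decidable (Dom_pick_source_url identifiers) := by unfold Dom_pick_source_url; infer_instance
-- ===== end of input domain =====

-- ===== PORT A =====
-- one-line objective: B fuses A's two scans into a single pass with a remembered first-http fallback (simpler decomposition; same O(n))
-- loop 1 of A: return the first value starting with the handle prefix
def pickA_loop1 : List String → Option String
  | [] => none
  | v :: rest =>
    if PySem.Str.startswith v "https://rfos.fon.bg.ac.rs/handle/" then some v
    else pickA_loop1 rest

-- loop 2 of A: return the first value starting with http:// or https://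
def pickA_loop2 : List String → Option String
  | [] => none
  | v :: rest =>
    if PySem.Str.startswith v "http://" || PySem.Str.startswith v "https://" then some v
    else pickA_loop2 rest

def pick_source_url (identifiers : List String) : Option String :=
  match pickA_loop1 identifiers with
  | some v => some v
  | none => pickA_loop2 identifiers

-- ===== PORT B =====
-- B's single loop, carrying the fallback variable
def pickB_loop : List String → Option String → Option String
  | [], fb => fb
  | v :: rest, fb =>
    if PySem.Str.startswith v "https://rfos.fon.bg.ac.rs/handle/" then some v
    else if fb = none && (PySem.Str.startswith v "http://" || PySem.Str.startswith v "https://") then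
      pickB_loop rest (some v)
    else pickB_loop rest fb

def pick_source_url_alt (identifiers : List String) : Option String :=
  pickB_loop identifiers none

-- ===== PRECONDITION & SPEC =====
def Spec_pick_source_url (identifiers : List String) (out : Option String) : Prop := out = pick_source_url_alt identifiers
instance (identifiers : List String) (out : Option String) : Decidable (Spec_pick_source_url identifiers out) := by unfold Spec_pick_source_url; infer_instance

-- ===== CLAIM (what is proved, stated in full; the proofs are below) =====
def Claim_equal_pick_source_url : Prop := ∀ (identifiers : List String), Dom_pick_source_url identifiers → Spec_pick_source_url identifiers (pick_source_url identifiers)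

-- ===== LEMMAS AND PROOFS =====
-- invariant of B's loop: a handle hit wins; otherwise the fallback (first http seen so far), then the first http in the rest
theorem pickB_loop_eq (ids : List String) (fb : Option String) :
    pickB_loop ids fb =
      match pickA_loop1 ids with
      | some v => some v
      | none => match fb with
        | some f => some f
        | none => pickA_loop2 ids := by
  induction ids generalizing fb with
  | nil => cases fb <;> rfl
  | cons v rest ih =>
    show (if PySem.Str.startswith v "https://rfos.fon.bg.ac.rs/handle/" then some v
          else if fb = none && (PySem.Str.startswith v "http://" || PySem.Str.startswith v "https://") then
            pickB_loop rest (some v)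
          else pickB_loop rest fb) = _
    by_cases h1 : PySem.Str.startswith v "https://rfos.fon.bg.ac.rs/handle/"
    · rw [if_pos h1]
      show _ = match (if PySem.Str.startswith v "https://rfos.fon.bg.ac.rs/handle/" then some v
                      else pickA_loop1 rest) with
               | some w => some w
               | none => match fb with | some f => some f | none => pickA_loop2 (v :: rest)
      rw [if_pos h1]
    · rw [if_neg h1]
      have hA1 : pickA_loop1 (v :: rest) = pickA_loop1 rest := by
        show (if PySem.Str.startswith v "https://rfos.fon.bg.ac.rs/handle/" then some v
              else pickA_loop1 rest) = _
        rw [if_neg h1]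
      rw [hA1]
      by_cases h2 : PySem.Str.startswith v "http://" || PySem.Str.startswith v "https://"
      · have hA2 : pickA_loop2 (v :: rest) = some v := by
          show (if PySem.Str.startswith v "http://" || PySem.Str.startswith v "https://" then some v
                else pickA_loop2 rest) = _
          rw [if_pos h2]
        cases fb with
        | none =>
          rw [if_pos (by rw [Bool.and_eq_true]; exact ⟨by decide, h2⟩)]
          rw [ih (some v), hA2]
        | some f =>
          rw [if_neg (by simp)]
          rw [ih (some f)]
      · have hA2 : pickA_loop2 (v :: rest) = pickA_loop2 rest := by
          show (if PySem.Str.startswith v "http://" || PySem.Str.startswith v "https://" then some v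
                else pickA_loop2 rest) = _
          rw [if_neg h2]
        rw [if_neg (by
          intro hc
          rw [Bool.and_eq_true] at hc
          exact h2 hc.2)]
        rw [ih fb, hA2]

-- ===== VERDICT (by name: the statement is the Claim_ definition above) =====
theorem pick_source_url_spec : Claim_equal_pick_source_url := by
  intro ids _
  unfold Spec_pick_source_url pick_source_url pick_source_url_alt
  rw [pickB_loop_eq]
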